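-- pv_equiv track=rewrite | github.com/chulbioinfo/ReAlignPro | src/realignpro/tsv2fig.py | _indices_for_one
-- ===== SOURCE A (Python) =====
-- from typing import Dict, List, Optional, Set, Tuple
--
-- def _indices_for_one(seq: str, marker: str) -> Set[int]:
--     marker_u = marker.upper().strip()
--     if not marker_u:
--         return set()
--
--     seq_u = seq.upper()
--     idxs: Set[int] = set()
--     m = len(marker_u)
--     start = 0
--     while True:
--         start = seq_u.find(marker_u, start)
--         if start == -1:
--             break
--         idxs.update(range(start, start + m))
--         start += 1
--     return idxs
-- ===== SOURCE B (Python) =====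
-- from typing import Set
--
--
-- def _indices_for_one(seq: str, marker: str) -> Set[int]:
--     marker_u = marker.upper().strip()
--     if not marker_u:
--         return set()
--
--     seq_u = seq.upper()
--     m = len(marker_u)
--     idxs: Set[int] = set()
--     for i in range(len(seq_u) - m + 1):
--         if seq_u[i:i + m] == marker_u:
--             idxs.update(range(i, i + m))
--     return idxs
-- ===== Notes on version B (the rewrite author's own statement) =====
-- stated objective: alternative
-- what changed: Replaces the find-and-advance while loop (repeated str.find with a moving start) by a naive sliding-window scan that tests every candidate start position with a direct slice comparison.
import Mathlib
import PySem

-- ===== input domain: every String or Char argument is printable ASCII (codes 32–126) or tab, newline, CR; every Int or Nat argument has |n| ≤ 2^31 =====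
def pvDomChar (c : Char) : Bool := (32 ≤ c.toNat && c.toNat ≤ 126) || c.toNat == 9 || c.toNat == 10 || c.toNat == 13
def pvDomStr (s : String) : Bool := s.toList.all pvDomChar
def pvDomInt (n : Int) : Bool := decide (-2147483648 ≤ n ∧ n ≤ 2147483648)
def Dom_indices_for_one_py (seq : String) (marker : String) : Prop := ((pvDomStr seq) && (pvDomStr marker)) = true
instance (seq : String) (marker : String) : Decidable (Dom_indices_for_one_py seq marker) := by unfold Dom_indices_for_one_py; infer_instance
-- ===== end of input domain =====

-- B replaces A's find-and-advance while loop by a naive sliding-window scan over all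
-- candidate start positions (alternative algorithm, same exact coverage set).

-- ===== PORT A =====
-- A's while loop: start = seq_u.find(marker_u, start); if -1 break; add range(start, start+m); start += 1.
-- Fuel (seqU.length + 1) only makes the recursion structural; it is never exhausted.
def pvLoopA (seqU markerU : List Char) (m : Nat) : Nat → Nat → PySem.Set Int → PySem.Set Int
  | 0, _, idxs => idxs
  | fuel + 1, start, idxs =>
    let f := PySem.Chars.findFrom seqU markerU (start : Int)
    if f = -1 then idxs
    else pvLoopA seqU markerU m fuel (f.toNat + 1)
      (PySem.Set.update idxs (PySem.List.pyRange f (f + (m : Int)) 1))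

def indices_for_one_py (seq : String) (marker : String) : List Int :=
  let markerU := PySem.Chars.strip (PySem.Chars.upper marker.toList)
  if markerU = [] then []
  else
    let seqU := PySem.Chars.upper seq.toList
    pvLoopA seqU markerU markerU.length (seqU.length + 1) 0 PySem.Set.empty

-- ===== PORT B =====
-- B's loop: for i in range(len(seq_u) - m + 1): if seq_u[i:i+m] == marker_u: idxs.update(range(i, i+m)).
def indices_for_one_py_alt (seq : String) (marker : String) : List Int :=
  let markerU := PySem.Chars.strip (PySem.Chars.upper marker.toList)
  if markerU = [] then []
  else
    let seqU := PySem.Chars.upper seq.toList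
    let m := markerU.length
    (PySem.List.pyRange 0 ((seqU.length : Int) - (m : Int) + 1) 1).foldl
      (fun idxs i =>
        if PySem.List.slice seqU (some i) (some (i + (m : Int))) = markerU then
          PySem.Set.update idxs (PySem.List.pyRange i (i + (m : Int)) 1)
        else idxs)
      PySem.Set.empty

-- ===== PRECONDITION & SPEC =====
def Spec_indices_for_one_py (seq : String) (marker : String) (out : List Int) : Prop := out = indices_for_one_py_alt seq marker
instance (seq : String) (marker : String) (out : List Int) : Decidable (Spec_indices_for_one_py seq marker out) := by unfold Spec_indices_for_one_py; infer_instance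

-- ===== CLAIM (what is proved, stated in full; the proofs are below) =====
def Claim_equal_indices_for_one_py : Prop := ∀ (seq : String) (marker : String), Dom_indices_for_one_py seq marker → Spec_indices_for_one_py seq marker (indices_for_one_py seq marker)

-- ===== LEMMAS AND PROOFS =====

-- the common reference: match positions ≥ start, in increasing order
def pvMatches (seqU markerU : List Char) (start : Nat) : List Nat :=
  (List.range' start (seqU.length - start)).filter (fun i => decide (markerU <+: seqU.drop i))

def pvUpd (m : Nat) (s : PySem.Set Int) (p : Nat) : PySem.Set Int :=
  PySem.Set.update s (PySem.List.pyRange (p : Int) ((p : Int) + (m : Int)) 1)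

lemma pv_infix_drop_iff (sub s : List Char) (k : Nat) :
    sub <:+: s.drop k ↔ ∃ j, k ≤ j ∧ sub <+: s.drop j := by
  rw [← PySem.Chars.isIn_iff_infix, ← PySem.Chars.exists_prefix_drop_iff_isIn]
  constructor
  · rintro ⟨j, hj⟩
    exact ⟨k + j, Nat.le_add_right _ _, by rwa [List.drop_drop] at hj⟩
  · rintro ⟨j, hk, hj⟩
    exact ⟨j - k, by rwa [List.drop_drop, Nat.add_sub_cancel' hk]⟩

-- first occurrence is at start
lemma pv_findFrom_self (seqU markerU : List Char) (start : Nat)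
    (hs : start ≤ seqU.length) (hm : markerU <+: seqU.drop start) :
    PySem.Chars.findFrom seqU markerU (start : Int) = (start : Int) := by
  have hne : PySem.Chars.findFrom seqU markerU (start : Int) ≠ -1 := by
    rw [Ne, PySem.Chars.findFrom_natCast_eq_neg_one_iff seqU markerU start hs]
    exact fun h => h hm.isInfix
  obtain ⟨h1, _h2, h3⟩ := PySem.Chars.findFrom_natCast_spec seqU markerU start hs hne
  have h0 : (0 : Int) ≤ PySem.Chars.findFrom seqU markerU (start : Int) := le_trans (by positivity) h1
  have : ¬ start < (PySem.Chars.findFrom seqU markerU (start : Int)).toNat :=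
    fun hl => h3 start le_rfl hl hm
  omega

-- no match at start: the search from start and from start+1 agree
lemma pv_findFrom_skip (seqU markerU : List Char) (start : Nat)
    (hs : start < seqU.length) (hm : ¬ markerU <+: seqU.drop start) :
    PySem.Chars.findFrom seqU markerU (start : Int)
      = PySem.Chars.findFrom seqU markerU ((start + 1 : Nat) : Int) := by
  have hs1 : start + 1 ≤ seqU.length := hs
  have hs0 : start ≤ seqU.length := Nat.le_of_lt hs
  by_cases h2 : PySem.Chars.findFrom seqU markerU ((start + 1 : Nat) : Int) = -1
  · rw [h2]
    rw [PySem.Chars.findFrom_natCast_eq_neg_one_iff seqU markerU start hs0]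
    rw [PySem.Chars.findFrom_natCast_eq_neg_one_iff seqU markerU (start + 1) hs1] at h2
    rw [pv_infix_drop_iff] at h2 ⊢
    rintro ⟨j, hkj, hj⟩
    rcases Nat.eq_or_lt_of_le hkj with rfl | hlt
    · exact hm hj
    · exact h2 ⟨j, hlt, hj⟩
  · obtain ⟨hb1, hb2, hb3⟩ := PySem.Chars.findFrom_natCast_spec seqU markerU (start + 1) hs1 h2
    set f2 := PySem.Chars.findFrom seqU markerU ((start + 1 : Nat) : Int) with hf2
    have hf2nn : (0 : Int) ≤ f2 := le_trans (by positivity) hb1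
    have h1 : PySem.Chars.findFrom seqU markerU (start : Int) ≠ -1 := by
      rw [Ne, PySem.Chars.findFrom_natCast_eq_neg_one_iff seqU markerU start hs0,
        pv_infix_drop_iff]
      intro h
      exact h ⟨f2.toNat, by omega, hb2⟩
    obtain ⟨ha1, ha2, ha3⟩ := PySem.Chars.findFrom_natCast_spec seqU markerU start hs0 h1
    set f1 := PySem.Chars.findFrom seqU markerU (start : Int) with hf1
    have hf1nn : (0 : Int) ≤ f1 := le_trans (by positivity) ha1
    have hne_start : f1.toNat ≠ start := fun h => hm (h ▸ ha2)
    have hc1 : ¬ f1.toNat < f2.toNat := fun h => hb3 f1.toNat (by omega) h ha2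
    have hc2 : ¬ f2.toNat < f1.toNat := fun h => ha3 f2.toNat (by omega) h hb2
    omega

-- search from position length finds nothing (marker nonempty)
lemma pv_findFrom_last (seqU markerU : List Char) (hne : markerU ≠ []) :
    PySem.Chars.findFrom seqU markerU (seqU.length : Int) = -1 := by
  rw [PySem.Chars.findFrom_natCast_eq_neg_one_iff seqU markerU seqU.length le_rfl]
  rw [List.drop_length, List.infix_nil]
  exact hne

lemma pv_matches_last (seqU markerU : List Char) :
    pvMatches seqU markerU seqU.length = [] := by
  simp [pvMatches]

lemma pv_matches_step (seqU markerU : List Char) (start : Nat) (hs : start < seqU.length) :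
    pvMatches seqU markerU start =
      if markerU <+: seqU.drop start then start :: pvMatches seqU markerU (start + 1)
      else pvMatches seqU markerU (start + 1) := by
  have h : seqU.length - start = (seqU.length - (start + 1)) + 1 := by omega
  rw [pvMatches, h, List.range'_succ, List.filter_cons]
  by_cases hp : markerU <+: seqU.drop start
  · simp [hp, pvMatches]
  · simp [hp, pvMatches]

-- A's loop folds pvUpd over the match positions
lemma pv_loopA_eq (seqU markerU : List Char) (hne : markerU ≠ []) :
    ∀ (k start fuel : Nat) (idxs : PySem.Set Int), start ≤ seqU.length →
      seqU.length - start = k → k + 1 ≤ fuel →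
      pvLoopA seqU markerU markerU.length fuel start idxs
        = (pvMatches seqU markerU start).foldl (pvUpd markerU.length) idxs := by
  intro k
  induction k with
  | zero =>
    intro start fuel idxs hs hk hf
    have hstart : start = seqU.length := by omega
    obtain ⟨fuel', rfl⟩ : ∃ f', fuel = f' + 1 := ⟨fuel - 1, by omega⟩
    subst hstart
    rw [pvLoopA, pv_matches_last]
    simp [pv_findFrom_last seqU markerU hne]
  | succ k ih =>
    intro start fuel idxs hs hk hf
    have hlt : start < seqU.length := by omega
    obtain ⟨fuel', rfl⟩ : ∃ f', fuel = f' + 1 := ⟨fuel - 1, by omega⟩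
    rw [pv_matches_step seqU markerU start hlt]
    by_cases hm : markerU <+: seqU.drop start
    · rw [pvLoopA]
      simp only [pv_findFrom_self seqU markerU start (Nat.le_of_lt hlt) hm]
      have hne1 : ((start : Int)) ≠ -1 := by omega
      rw [if_neg hne1, if_pos hm, List.foldl_cons]
      have : (start : Int).toNat = start := Int.toNat_natCast start
      rw [this]
      exact ih (start + 1) fuel' _ hlt (by omega) (by omega)
    · rw [if_neg hm]
      have hskip := pv_findFrom_skip seqU markerU start hlt hm
      have hsame : pvLoopA seqU markerU markerU.length (fuel' + 1) start idxs
          = pvLoopA seqU markerU markerU.length (fuel' + 1) (start + 1) idxs := by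
        rw [pvLoopA, pvLoopA]
        simp only [hskip, Nat.cast_add, Nat.cast_one]
      rw [hsame]
      exact ih (start + 1) (fuel' + 1) idxs hlt (by omega) (by omega)

-- the slice test is the prefix test
lemma pv_cond_eq (seqU markerU : List Char) (i : Nat) :
    (PySem.List.slice seqU (some (i : Int)) (some ((i : Int) + (markerU.length : Int)))
        = markerU)
      ↔ markerU <+: seqU.drop i := by
  rw [PySem.List.slice_natCast_add seqU i markerU.length, List.prefix_iff_eq_take]
  exact ⟨fun h => h.symm, fun h => h.symm⟩

-- B's fold folds pvUpd over the match positions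
lemma pv_altFold_eq (seqU markerU : List Char) (hne : markerU ≠ []) (idxs : PySem.Set Int) :
    (PySem.List.pyRange 0 ((seqU.length : Int) - (markerU.length : Int) + 1) 1).foldl
      (fun idxs i =>
        if PySem.List.slice seqU (some i) (some (i + (markerU.length : Int))) = markerU then
          PySem.Set.update idxs (PySem.List.pyRange i (i + (markerU.length : Int)) 1)
        else idxs) idxs
      = (pvMatches seqU markerU 0).foldl (pvUpd markerU.length) idxs := by
  set n := seqU.length with hn
  set m := markerU.length with hm
  have hm1 : 1 ≤ m := by
    cases markerU with
    | nil => exact absurd rfl hne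
    | cons a l => simp [hm]
  have hlong : ∀ i : Nat, markerU <+: seqU.drop i → i + m ≤ n := by
    intro i hp
    have := hp.length_le
    rw [List.length_drop] at this
    omega
  by_cases hmn : m ≤ n
  · have hcast : (n : Int) - (m : Int) + 1 = ((n - m + 1 : Nat) : Int) := by push_cast; omega
    rw [hcast, PySem.List.pyRange_zero_natCast, List.foldl_map]
    have hsplit : List.range' 0 n = List.range' 0 (n - m + 1) ++ List.range' (n - m + 1) (m - 1) := by
      have : List.range' 0 (n - m + 1) 1 ++ List.range' (0 + 1 * (n - m + 1)) (m - 1) 1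
          = List.range' 0 ((n - m + 1) + (m - 1)) 1 := List.range'_append
      simp only [one_mul, Nat.zero_add] at this
      rw [this]
      congr 1
      omega
    have htail : (List.range' (n - m + 1) (m - 1)).filter
        (fun i => decide (markerU <+: seqU.drop i)) = [] := by
      rw [List.filter_eq_nil_iff]
      intro i hi
      simp only [decide_eq_true_eq]
      intro hp
      rw [List.mem_range'] at hi
      obtain ⟨j, hj, rfl⟩ := hi
      have := hlong _ hp
      omega
    rw [pvMatches, Nat.sub_zero, hsplit, List.filter_append, htail, List.append_nil,
      ← List.range_eq_range', List.foldl_filter]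
    apply PySem.List.foldl_congr_mem
    intro b a _
    by_cases hc : markerU <+: seqU.drop a
    · rw [if_pos ((pv_cond_eq seqU markerU a).mpr hc), if_pos (by simpa using hc)]
      rfl
    · rw [if_neg (fun h => hc ((pv_cond_eq seqU markerU a).mp h)),
        if_neg (by simpa using hc)]
  · have hneg : PySem.List.pyRange 0 ((n : Int) - (m : Int) + 1) 1 = [] := by
      simp only [PySem.List.pyRange]
      have : ¬ ((0 : Int) < (n : Int) - (m : Int) + 1) := by omega
      simp [this]
    have hnil : pvMatches seqU markerU 0 = [] := by
      rw [pvMatches, List.filter_eq_nil_iff]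
      intro i hi
      simp only [decide_eq_true_eq]
      intro hp
      have := hlong _ hp
      omega
    rw [hneg, hnil]
    rfl

-- ===== VERDICT (by name: the statement is the Claim_ definition above) =====
theorem indices_for_one_py_spec : Claim_equal_indices_for_one_py := by
  intro seq marker _
  unfold Spec_indices_for_one_py indices_for_one_py indices_for_one_py_alt
  set markerU := PySem.Chars.strip (PySem.Chars.upper marker.toList) with hmu
  by_cases hne : markerU = []
  · simp [hne]
  · rw [if_neg hne, if_neg hne]
    set seqU := PySem.Chars.upper seq.toList with hsu
    rw [pv_loopA_eq seqU markerU hne seqU.length 0 (seqU.length + 1) PySem.Set.empty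
      (Nat.zero_le _) (Nat.sub_zero _) le_rfl]
    rw [pv_altFold_eq seqU markerU hne PySem.Set.empty]
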